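-- pv_equiv track=rewrite | github.com/JordanRichard/AdventOfCode23 | gearratio2.py | build_number
-- ===== SOURCE A (Python) =====
-- def build_number(data, coords):
--     '''
--         Given a set of coordinates containing a numeric value, build the whole number.
--     '''
--     row = coords[0]
--     left = coords[1]
--     right = coords[1]
--
--     #   Scan to the left to find the left edge of the number
--     while left > 0 and data[row][left - 1].isnumeric():
--         left -= 1
--
--     #   Scan right to find the right edge
--     while right < len(data[0]) - 1 and data[row][right + 1].isnumeric():
--         right += 1
--
--     num = ""
--     for i in range(left, right + 1):
--         num += data[row][i]
--
--     return(num)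
-- ===== SOURCE B (Python) =====
-- def build_number(data, coords):
--     '''
--         Given a set of coordinates containing a numeric value, build the whole number.
--         Strips the digit runs off the slices before/after the seed digit instead of
--         scanning with index loops.
--     '''
--     digits = "0123456789"
--     row, col = coords
--     line = data[row]
--     before = line[:col]
--     after = line[col + 1:]
--     run = len(after) - len(after.lstrip(digits))
--     return before[len(before.rstrip(digits)):] + line[col] + after[:run]
-- ===== Notes on version B (the rewrite author's own statement) =====
-- stated objective: alternative
-- what changed: A finds the number with two index-walking while loops (left edge, right edge) and a character-append loop; B slices the row before/after the coordinate, strips the digit run off each slice with rstrip/lstrip length arithmetic, and returns one slice of the row; Pre_ excludes negative columns (A's value there is negative-index wraparound) and the out-of-range/ragged inputs on which A raises IndexError.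
-- intended difference: On ragged grids where the digit run right of the coordinate crosses column len(data[0])-1 of a longer row, A returns the number truncated at row 0's width (it bounds the right scan by len(data[0]) instead of len(data[row])), while B returns the whole number, which is the function's stated purpose. — e.g. on build_number(["12", "345"], (1, 0)): A returns "34", B returns "345"
-- outside the precondition, e.g. on build_number(['12'], (0, -1)): A returns '212', B returns '1212'
import Mathlib
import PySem

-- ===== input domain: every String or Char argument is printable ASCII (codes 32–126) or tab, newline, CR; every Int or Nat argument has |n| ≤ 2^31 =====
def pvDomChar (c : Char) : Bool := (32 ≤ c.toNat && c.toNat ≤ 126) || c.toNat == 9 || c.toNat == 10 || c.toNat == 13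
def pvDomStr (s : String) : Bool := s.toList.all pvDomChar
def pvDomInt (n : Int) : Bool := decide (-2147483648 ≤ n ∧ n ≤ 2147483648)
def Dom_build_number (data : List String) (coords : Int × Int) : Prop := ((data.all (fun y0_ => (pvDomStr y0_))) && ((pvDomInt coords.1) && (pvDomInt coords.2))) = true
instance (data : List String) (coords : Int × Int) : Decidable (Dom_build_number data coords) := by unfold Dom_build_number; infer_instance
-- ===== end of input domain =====

set_option maxHeartbeats 1000000


-- B builds the number by stripping the digit runs off the slices before/after the coordinate
-- (no index-scanning loops); on ragged grids where the digit run crosses row 0's width A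
-- truncates the number, B returns the whole number (stated as the intended difference D_).
-- '.isnumeric()' is ported as PySem.Chars.isdigit, exact on the stated ASCII domain.

-- ===== PORT A =====
-- 'while left > 0 and data[row][left-1].isnumeric(): left -= 1' — fuel = left.toNat bounds the
-- iteration count exactly (left decreases by 1 each step and must stay > 0).
def pvLeftScan (line : List Char) : Nat → Int → Int
  | 0, left => left
  | f + 1, left =>
    if left > 0 && PySem.Chars.isdigit (PySem.List.pyGetD line (left - 1) ' ') then
      pvLeftScan line f (left - 1)
    else left

-- 'while right < len(data[0]) - 1 and data[row][right+1].isnumeric(): right += 1' — fuel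
-- (width - 1 - right).toNat bounds the iteration count exactly.
def pvRightScan (line : List Char) (width : Int) : Nat → Int → Int
  | 0, r => r
  | f + 1, r =>
    if r < width - 1 && PySem.Chars.isdigit (PySem.List.pyGetD line (r + 1) ' ') then
      pvRightScan line width f (r + 1)
    else r

def build_number (data : List String) (coords : Int × Int) : String :=
  let row := coords.1
  let line := (PySem.List.pyGetD data row "").toList
  let width : Int := ((PySem.List.pyGetD data 0 "").toList.length : Int)
  let left := pvLeftScan line coords.2.toNat coords.2
  let right := pvRightScan line width (width - 1 - coords.2).toNat coords.2
  String.ofList ((PySem.List.pyRange left (right + 1)).foldl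
    (fun acc i => acc ++ [PySem.List.pyGetD line i ' ']) [])

-- ===== PORT B =====
def pvDigits : List Char := ['0','1','2','3','4','5','6','7','8','9']

-- hand ports of str.rstrip(chars) / str.lstrip(chars) (PySem has no one-sided strip with a
-- chars argument): Python drops from the right (resp. left) every char in 'chars' — exact.
def pvRstrip (cs chars : List Char) : List Char :=
  (cs.reverse.dropWhile (fun c => chars.contains c)).reverse

def pvLstrip (cs chars : List Char) : List Char :=
  cs.dropWhile (fun c => chars.contains c)

def build_number_alt (data : List String) (coords : Int × Int) : String :=
  let row := coords.1
  let col := coords.2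
  let line := (PySem.List.pyGetD data row "").toList
  let before := PySem.List.slice line none (some col)
  let after := PySem.List.slice line (some (col + 1)) none
  let run : Nat := after.length - (pvLstrip after pvDigits).length
  String.ofList (PySem.List.slice before (some ((pvRstrip before pvDigits).length : Int)) none
    ++ [PySem.List.pyGetD line col ' ']
    ++ PySem.List.slice after none (some (run : Int)))

-- ===== PRECONDITION & SPEC =====
-- Pre_ restricts to the natural domain: a non-negative column inside the addressed row (so it
-- excludes out-of-range rows/columns, where A raises IndexError, and negative columns, where
-- A's value is an accident of Python's negative-index wraparound), and excludes the ragged-row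
-- inputs on which A's right scan runs past the end of the row and raises IndexError.
def Pre_build_number (data : List String) (coords : Int × Int) : Prop :=
  0 ≤ coords.2 ∧
  coords.2 < ((PySem.List.pyGetD data coords.1 "").toList.length : Int) ∧
  ¬ ((PySem.List.pyGetD data coords.1 "").toList.length < (PySem.List.pyGetD data 0 "").toList.length ∧
     (((PySem.List.pyGetD data coords.1 "").toList.drop (coords.2.toNat + 1)).all PySem.Chars.isdigit))
instance (data : List String) (coords : Int × Int) : Decidable (Pre_build_number data coords) := by
  unfold Pre_build_number; infer_instance

def pvWitness_build_number : List String × (Int × Int) := (["467..114.."], (0, 6))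

-- On ragged grids where the digit run right of the coordinate crosses column len(data[0])-1 of a
-- longer row, A returns the number truncated at row 0's width (its right scan is bounded by
-- len(data[0]) instead of len(data[row])), while B returns the whole number, which is the
-- function's stated purpose.
def D_build_number (data : List String) (coords : Int × Int) : Prop :=
  ∀ k : Nat, k < max (data.headD "").toList.length (coords.2.toNat + 1) - coords.2.toNat →
    ∃ h : coords.2.toNat + 1 + k < (PySem.List.pyGetD data coords.1 "").toList.length,
      PySem.Chars.isdigit (PySem.List.pyGetD data coords.1 "").toList[coords.2.toNat + 1 + k]
instance (data : List String) (coords : Int × Int) : Decidable (D_build_number data coords) := by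
  unfold D_build_number; infer_instance

def Spec_build_number (data : List String) (coords : Int × Int) (out : String) : Prop :=
  ¬ D_build_number data coords → out = build_number_alt data coords
instance (data : List String) (coords : Int × Int) (out : String) : Decidable (Spec_build_number data coords out) := by
  unfold Spec_build_number; infer_instance

def pvDiffWitness_build_number : List String × (Int × Int) := (["12", "345"], (1, 0))
def pvDiffWitnessOut_build_number : String × String := ("34", "345")

-- ===== CLAIM (what is proved, stated in full; the proofs are below) =====
def Claim_unchanged_build_number : Prop := ∀ (data : List String) (coords : Int × Int),
  Dom_build_number data coords → Pre_build_number data coords →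
  Spec_build_number data coords (build_number data coords)

def Claim_changed_build_number : Prop :=
  Dom_build_number (pvDiffWitness_build_number.1) (pvDiffWitness_build_number.2) ∧
  Pre_build_number (pvDiffWitness_build_number.1) (pvDiffWitness_build_number.2) ∧
  D_build_number (pvDiffWitness_build_number.1) (pvDiffWitness_build_number.2) ∧
  build_number (pvDiffWitness_build_number.1) (pvDiffWitness_build_number.2) = pvDiffWitnessOut_build_number.1 ∧
  build_number_alt (pvDiffWitness_build_number.1) (pvDiffWitness_build_number.2) = pvDiffWitnessOut_build_number.2 ∧
  pvDiffWitnessOut_build_number.1 ≠ pvDiffWitnessOut_build_number.2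

def Claim_exact_build_number : Prop := ∀ (data : List String) (coords : Int × Int),
  Dom_build_number data coords → Pre_build_number data coords →
  D_build_number data coords → build_number data coords ≠ build_number_alt data coords

-- ===== LEMMAS AND PROOFS =====

-- Source B's digit set names exactly the characters PySem.Chars.isdigit accepts
theorem pvDigits_contains (c : Char) : pvDigits.contains c = PySem.Chars.isdigit c := by
  have hiff : c ∈ pvDigits ↔ ('0' ≤ c ∧ c ≤ '9') := by
    constructor
    · intro h; fin_cases h <;> exact ⟨by decide, by decide⟩
    · rintro ⟨h1, h2⟩
      have h1' : 48 ≤ c.toNat := h1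
      have h2' : c.toNat ≤ 57 := h2
      have hc : c = Char.ofNat c.toNat := (Char.ofNat_toNat c).symm
      set m := c.toNat with hm
      interval_cases m <;> rw [hc] <;> decide
  rw [List.contains_eq_mem, PySem.Chars.isdigit]
  simp [hiff]

theorem pvDigits_fun : (fun c => pvDigits.contains c) = PySem.Chars.isdigit :=
  funext pvDigits_contains

theorem pv_length_dropWhile {α : Type} (p : α → Bool) (l : List α) :
    (l.dropWhile p).length = l.length - (l.takeWhile p).length := by
  have h : (l.takeWhile p).length + (l.dropWhile p).length = l.length := by
    rw [← List.length_append, List.takeWhile_append_dropWhile]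
  omega

-- characterisation of A's left scan: it lands on (col − length of the digit suffix of line[:col])
theorem pvLeftScan_eq (cs : List Char) : ∀ (n : Nat), n ≤ cs.length →
    pvLeftScan cs n (n : Int)
      = (n : Int) - (((cs.take n).reverse.takeWhile PySem.Chars.isdigit).length : Int) := by
  intro n
  induction n with
  | zero => intro _; simp [pvLeftScan]
  | succ n ih =>
    intro hle
    have hn : n < cs.length := by omega
    have hget : PySem.List.pyGetD cs ((n : Int) + 1 - 1) ' ' = cs[n] := by
      rw [show ((n : Int) + 1 - 1) = (n : Int) by ring]
      exact PySem.List.pyGetD_eq_getElem cs ' ' (by positivity) (by exact_mod_cast hn)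
    have htake : (cs.take (n + 1)).reverse = cs[n] :: (cs.take n).reverse := by
      rw [List.take_add_one, List.getElem?_eq_getElem hn]
      simp
    show pvLeftScan cs (n + 1) ((n : Nat) + 1 : Int) = _
    rw [pvLeftScan]
    push_cast
    rw [hget]
    by_cases hd : PySem.Chars.isdigit cs[n]
    · have hcond : (decide ((n : Int) + 1 > 0) && PySem.Chars.isdigit cs[n]) = true := by
        simp [hd]
      rw [hcond, if_pos rfl]
      rw [show ((n : Int) + 1 - 1) = (n : Int) by ring]
      rw [ih (by omega), htake, List.takeWhile_cons, hd]
      simp only [if_true]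
      simp only [List.length_cons]
      push_cast
      ring
    · have hcond : (decide ((n : Int) + 1 > 0) && PySem.Chars.isdigit cs[n]) = false := by
        simp [hd]
      rw [hcond, if_neg (by simp)]
      rw [htake, List.takeWhile_cons]
      simp [hd]

-- characterisation of A's right scan: col + (digit prefix of line[col+1:], capped by the fuel)
theorem pvRightScan_eq (cs : List Char) (w : Int) : ∀ (f : Nat) (n : Nat), n < cs.length →
    (f : Int) = max (w - 1 - (n : Int)) 0 →
    pvRightScan cs w f (n : Int)
      = (n : Int) + (min (((cs.drop (n + 1)).takeWhile PySem.Chars.isdigit).length) f : Int) := by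
  intro f
  induction f with
  | zero => intro n _ _; simp [pvRightScan]
  | succ f ih =>
    intro n hn hf
    have hw : w - 1 - (n : Int) = (f : Int) + 1 := by omega
    have hcond1 : decide ((n : Int) < w - 1) = true := by simp; omega
    rw [pvRightScan, hcond1, Bool.true_and]
    by_cases hlen : n + 1 < cs.length
    · have hget : PySem.List.pyGetD cs ((n : Int) + 1) ' ' = cs[n + 1] := by
        rw [show ((n : Int) + 1) = ((n + 1 : Nat) : Int) by push_cast; ring]
        exact PySem.List.pyGetD_eq_getElem cs ' ' (by positivity) (by exact_mod_cast hlen)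
      have hdrop : cs.drop (n + 1) = cs[n + 1] :: cs.drop (n + 2) := by
        rw [List.drop_eq_getElem_cons hlen]
      rw [hget]
      by_cases hd : PySem.Chars.isdigit cs[n + 1]
      · rw [hd, if_pos rfl]
        rw [show ((n : Int) + 1) = ((n + 1 : Nat) : Int) by push_cast; ring]
        rw [ih (n + 1) hlen (by push_cast; omega)]
        rw [hdrop, List.takeWhile_cons, hd]
        simp only [if_true, List.length_cons]
        have : cs.drop (n + 1 + 1) = cs.drop (n + 2) := by norm_num
        rw [this]
        push_cast
        omega
      · rw [Bool.eq_false_iff.mpr hd, if_neg (by simp)]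
        rw [hdrop, List.takeWhile_cons, Bool.eq_false_iff.mpr hd]
        simp
        omega
    · have hget : PySem.List.pyGetD cs ((n : Int) + 1) ' ' = ' ' := by
        apply PySem.List.pyGetD_of_none
        rw [PySem.List.pyGet?_eq_none_iff, PySem.Raise.InRange]
        omega
      rw [hget]
      have hsp : PySem.Chars.isdigit ' ' = false := by decide
      rw [hsp, if_neg (by simp)]
      have hdropnil : cs.drop (n + 1) = [] := by
        apply List.drop_eq_nil_of_le; omega
      rw [hdropnil]
      simp
      omega

-- A's building loop over range(left, right+1) collects line[left:right+1]
theorem pv_map_pyGetD_range (cs : List Char) (d : Char) :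
    ∀ (k a b : Nat), b - a = k → b ≤ cs.length →
    (PySem.List.pyRange (a : Int) (b : Int)).map (fun i => PySem.List.pyGetD cs i d)
      = (cs.take b).drop a := by
  intro k
  induction k with
  | zero =>
    intro a b hk hb
    have hba : (b : Int) ≤ (a : Int) := by exact_mod_cast Nat.le_of_sub_eq_zero hk
    rw [PySem.List.pyRange_one_eq_nil hba, List.map_nil]
    symm
    apply List.drop_eq_nil_of_le
    simp; omega
  | succ k ih =>
    intro a b hk hb
    have hab : a < b := by omega
    have ha : a < cs.length := by omega
    rw [PySem.List.pyRange_one_cons (by exact_mod_cast hab), List.map_cons]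
    have hget : PySem.List.pyGetD cs (a : Int) d = cs[a] :=
      PySem.List.pyGetD_eq_getElem cs d (by positivity) (by exact_mod_cast ha)
    rw [hget]
    rw [show ((a : Int) + 1) = ((a + 1 : Nat) : Int) by push_cast; ring]
    rw [ih (a + 1) b (by omega) hb]
    have hcons : (cs.take b).drop a = cs[a] :: (cs.take b).drop (a + 1) := by
      rw [List.drop_eq_getElem_cons (by simp; omega)]
      congr 1
      rw [List.getElem_take]
    rw [hcons]

-- bounded-∀ characterisation of takeWhile's length (links D_ to the scans' digit prefix)
theorem pv_takeWhile_ge {α : Type} (p : α → Bool) : ∀ (l : List α) (k : Nat),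
    k ≤ (l.takeWhile p).length ↔ ∀ i, i < k → ∃ h : i < l.length, p l[i] := by
  intro l
  induction l with
  | nil =>
    intro k
    cases k with
    | zero => simp
    | succ k =>
      simp only [List.takeWhile_nil, List.length_nil]
      constructor
      · intro h; omega
      · intro h
        obtain ⟨hh, _⟩ := h 0 (by omega)
        simp at hh
  | cons a t ih =>
    intro k
    cases k with
    | zero => simp
    | succ k =>
      by_cases hp : p a
      · rw [List.takeWhile_cons_of_pos hp]
        simp only [List.length_cons]
        constructor
        · intro h i hi
          cases i with
          | zero => exact ⟨by simp, by simpa using hp⟩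
          | succ i =>
            obtain ⟨hh, hq⟩ := (ih k).mp (by omega) i (by omega)
            exact ⟨by simpa using Nat.succ_lt_succ hh, by simpa using hq⟩
        · intro h
          have hk : k ≤ (t.takeWhile p).length := by
            refine (ih k).mpr (fun i hi => ?_)
            obtain ⟨hh, hq⟩ := h (i + 1) (by omega)
            exact ⟨by simpa using hh, by simpa using hq⟩
          omega
      · rw [List.takeWhile_cons_of_neg (by simpa using hp)]
        simp only [List.length_nil]
        constructor
        · intro h; omega
        · intro h
          obtain ⟨hh, hq⟩ := h 0 (by omega)
          simp only [List.getElem_cons_zero] at hq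
          exact absurd hq hp

-- D_ (a bounded ∀ over the input's characters) says exactly: the digit prefix right of the
-- coordinate is longer than A's scan bound max(width−1−col, 0)
theorem pvD_iff (data : List String) (coords : Int × Int) (h0 : 0 ≤ coords.2) :
    D_build_number data coords ↔
      ((((PySem.List.pyGetD data coords.1 "").toList.drop (coords.2.toNat + 1)).takeWhile
          PySem.Chars.isdigit).length : Int)
        > max (((PySem.List.pyGetD data 0 "").toList.length : Int) - 1 - coords.2) 0 := by
  unfold D_build_number
  set cs : List Char := (PySem.List.pyGetD data coords.1 "").toList with hcs
  set n : Nat := coords.2.toNat with hn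
  have hc2 : coords.2 = (n : Int) := by omega
  have hhead : (data.headD "").toList.length = (PySem.List.pyGetD data 0 "").toList.length := by
    cases data <;> simp [PySem.List.pyGetD, PySem.List.pyGet?, PySem.List.pyIdx?]
  set W : Nat := (PySem.List.pyGetD data 0 "").toList.length with hW
  rw [hhead]
  set j : Nat := max W (n + 1) with hj
  have hmain : (∀ k : Nat, k < j - n →
        ∃ h : n + 1 + k < cs.length, PySem.Chars.isdigit cs[n + 1 + k])
      ↔ j - n ≤ ((cs.drop (n + 1)).takeWhile PySem.Chars.isdigit).length := by
    rw [pv_takeWhile_ge]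
    constructor
    · intro hd i' hi'
      obtain ⟨h, hq⟩ := hd i' hi'
      refine ⟨by simp only [List.length_drop]; omega, ?_⟩
      simpa [List.getElem_drop] using hq
    · intro hd k hk
      obtain ⟨h, hq⟩ := hd k hk
      simp only [List.length_drop] at h
      refine ⟨by omega, ?_⟩
      simpa [List.getElem_drop] using hq
  rw [hmain]
  omega

-- A's value in closed form: line[col−L : col+R+1], L the digit suffix of line[:col],
-- R the digit prefix of line[col+1:] capped by the fuel (width−1−col).toNat
theorem pvA_eval (data : List String) (coords : Int × Int)
    (h0 : 0 ≤ coords.2)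
    (hlt : coords.2 < ((PySem.List.pyGetD data coords.1 "").toList.length : Int)) :
    build_number data coords = String.ofList
      (((PySem.List.pyGetD data coords.1 "").toList.take
          (coords.2.toNat +
            min ((((PySem.List.pyGetD data coords.1 "").toList.drop (coords.2.toNat + 1)).takeWhile PySem.Chars.isdigit).length)
                ((((PySem.List.pyGetD data 0 "").toList.length : Int) - 1 - coords.2).toNat) + 1)).drop
        (coords.2.toNat -
          (((PySem.List.pyGetD data coords.1 "").toList.take coords.2.toNat).reverse.takeWhile PySem.Chars.isdigit).length)) := by
  unfold build_number
  dsimp only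
  set cs : List Char := (PySem.List.pyGetD data coords.1 "").toList with hcs
  set W : Nat := (PySem.List.pyGetD data 0 "").toList.length with hW
  set n : Nat := coords.2.toNat with hn
  have hc2 : coords.2 = (n : Int) := by omega
  have hnlen : n < cs.length := by omega
  set L : Nat := ((cs.take n).reverse.takeWhile PySem.Chars.isdigit).length with hL
  set D : Nat := ((cs.drop (n + 1)).takeWhile PySem.Chars.isdigit).length with hD
  have hLle : L ≤ n := by
    have := (List.takeWhile_prefix (l := (cs.take n).reverse) (p := PySem.Chars.isdigit)).length_le
    simp at this
    omega
  have hDle : D ≤ cs.length - (n + 1) := by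
    have := (List.takeWhile_prefix (l := cs.drop (n + 1)) (p := PySem.Chars.isdigit)).length_le
    simp at this
    omega
  set f : Nat := ((W : Int) - 1 - coords.2).toNat with hf
  set R : Nat := min D f with hR
  have hleft : pvLeftScan cs coords.2.toNat coords.2 = ((n - L : Nat) : Int) := by
    rw [hc2, Int.toNat_natCast, pvLeftScan_eq cs n (by omega), ← hL]
    omega
  have hright : pvRightScan cs (W : Int) f coords.2 = ((n + R : Nat) : Int) := by
    rw [hc2, pvRightScan_eq cs (W : Int) f n hnlen (by rw [hf, hc2]; omega), ← hD]
    push_cast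
    omega
  rw [hleft, hright]
  rw [PySem.List.foldl_append_singleton_eq_map (f := fun i => PySem.List.pyGetD cs i ' ')]
  rw [show ((n + R : Nat) : Int) + 1 = ((n + R + 1 : Nat) : Int) by push_cast; ring]
  rw [pv_map_pyGetD_range cs ' ' (n + R + 1 - (n - L)) (n - L) (n + R + 1) rfl (by omega),
    List.nil_append]

-- B's value in closed form: line[col−L : col+D+1], D the FULL digit prefix of line[col+1:]
theorem pvB_eval (data : List String) (coords : Int × Int)
    (h0 : 0 ≤ coords.2)
    (hlt : coords.2 < ((PySem.List.pyGetD data coords.1 "").toList.length : Int)) :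
    build_number_alt data coords = String.ofList
      (((PySem.List.pyGetD data coords.1 "").toList.take
          (coords.2.toNat +
            (((PySem.List.pyGetD data coords.1 "").toList.drop (coords.2.toNat + 1)).takeWhile PySem.Chars.isdigit).length + 1)).drop
        (coords.2.toNat -
          (((PySem.List.pyGetD data coords.1 "").toList.take coords.2.toNat).reverse.takeWhile PySem.Chars.isdigit).length)) := by
  unfold build_number_alt
  dsimp only
  set cs : List Char := (PySem.List.pyGetD data coords.1 "").toList with hcs
  set n : Nat := coords.2.toNat with hn
  have hc2 : coords.2 = (n : Int) := by omega
  have hnlen : n < cs.length := by omega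
  set L : Nat := ((cs.take n).reverse.takeWhile PySem.Chars.isdigit).length with hL
  set D : Nat := ((cs.drop (n + 1)).takeWhile PySem.Chars.isdigit).length with hD
  have hLle : L ≤ n := by
    have := (List.takeWhile_prefix (l := (cs.take n).reverse) (p := PySem.Chars.isdigit)).length_le
    simp at this
    omega
  have hDle : D ≤ cs.length - (n + 1) := by
    have := (List.takeWhile_prefix (l := cs.drop (n + 1)) (p := PySem.Chars.isdigit)).length_le
    simp at this
    omega
  rw [hc2]
  rw [show ((n : Int) + 1) = ((n + 1 : Nat) : Int) by push_cast; ring]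
  simp only [PySem.List.slice_to_natCast, PySem.List.slice_from_natCast]
  have hkeepL : (pvRstrip (cs.take n) pvDigits).length = n - L := by
    rw [pvRstrip, pvDigits_fun]
    rw [List.length_reverse, pv_length_dropWhile, List.length_reverse, List.length_take,
      min_eq_left (by omega : n ≤ cs.length), ← hL]
  have hkeepR : (pvLstrip (cs.drop (n + 1)) pvDigits).length = cs.length - (n + 1) - D := by
    rw [pvLstrip, pvDigits_fun]
    rw [pv_length_dropWhile, List.length_drop, ← hD]
  rw [hkeepL, hkeepR, List.length_drop,
    show cs.length - (n + 1) - (cs.length - (n + 1) - D) = D by omega]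
  have hmid : PySem.List.pyGetD cs (n : Int) ' ' = cs[n] :=
    PySem.List.pyGetD_eq_getElem cs ' ' (by positivity) (by exact_mod_cast hnlen)
  rw [hmid]
  have hsplit1 : cs.take (n + D + 1) = cs.take n ++ (cs.take (n + D + 1)).drop n := by
    conv_lhs => rw [← List.take_append_drop n (cs.take (n + D + 1))]
    rw [List.take_take, min_eq_left (by omega)]
  have hlen_take : n < (cs.take (n + D + 1)).length := by
    rw [List.length_take]
    omega
  have hsplit2 : (cs.take (n + D + 1)).drop n = cs[n] :: (cs.drop (n + 1)).take D := by
    rw [List.drop_eq_getElem_cons hlen_take]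
    congr 1
    · rw [List.getElem_take]
    · rw [List.drop_take]
      congr 1
      omega
  rw [show n + D + 1 = n + D + 1 from rfl, hsplit1,
    List.drop_append_of_le_length (by rw [List.length_take]; omega), hsplit2]
  simp

-- ===== VERDICT (by name: the statements are the Claim_ definitions above) =====
theorem build_number_spec : Claim_unchanged_build_number := by
  intro data coords _hdom hpre
  obtain ⟨h0, hlt, _hraise⟩ := hpre
  intro hnD
  rw [pvA_eval data coords h0 hlt, pvB_eval data coords h0 hlt]
  rw [pvD_iff data coords h0] at hnD
  congr 3
  omega

theorem build_number_changed : Claim_changed_build_number := by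
  unfold Claim_changed_build_number; decide

theorem build_number_tight : Claim_exact_build_number := by
  intro data coords _hdom hpre hD
  obtain ⟨h0, hlt, _hraise⟩ := hpre
  rw [pvA_eval data coords h0 hlt, pvB_eval data coords h0 hlt]
  rw [pvD_iff data coords h0] at hD
  intro h
  have h' := congrArg String.toList h
  simp only [String.toList_ofList] at h'
  have hlen := congrArg List.length h'
  set cs : List Char := (PySem.List.pyGetD data coords.1 "").toList with hcs
  set n : Nat := coords.2.toNat with hn
  set L : Nat := ((cs.take n).reverse.takeWhile PySem.Chars.isdigit).length with hL
  set D : Nat := ((cs.drop (n + 1)).takeWhile PySem.Chars.isdigit).length with hD'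
  have hLle : L ≤ n := by
    have := (List.takeWhile_prefix (l := (cs.take n).reverse) (p := PySem.Chars.isdigit)).length_le
    simp at this
    omega
  have hDle : D ≤ cs.length - (n + 1) := by
    have := (List.takeWhile_prefix (l := cs.drop (n + 1)) (p := PySem.Chars.isdigit)).length_le
    simp at this
    omega
  simp only [List.length_drop, List.length_take] at hlen
  omega
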